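-- pv_equiv track=rewrite | github.com/shashi0011/Fully-Automated-Data-Engineer-Agent | mini-services/dataforge-backend/agent/tools/schema_detector.py | _detect_dataset_type
-- ===== SOURCE A (Python) =====
-- from typing import Dict, Any, List, Optional, Tuple
--
-- def _detect_dataset_type(columns_info: Dict) -> str:
--     """Detect the type of dataset using weighted scoring (education-aware, no false medical)"""
--     col_names_lower = {k.lower() for k in columns_info.keys()}
--
--     # Strong keywords = 3 points, Weak keywords = 1 point
--     # Generic terms like age, gender, name only give 1 point (never trigger false positives)
--     type_keywords = {
--         "education": {
--             3: {"student", "grade", "midterm", "final_exam", "attendance",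
--                 "assignment", "exam", "gpa", "school", "university", "college",
--                 "teacher", "lecture", "course", "semester", "homework", "class",
--                 "study_hours", "participation_score", "overall_score", "sleep_hours",
--                 "extra_classes", "parent_education", "internet_access"},
--             1: {"score", "pass", "fail"},
--         },
--         "medical": {
--             3: {"patient", "diagnosis", "treatment", "medication", "symptom",
--                 "doctor", "physician", "hospital", "disease", "clinical", "dosage",
--                 "prescription", "lab_result", "blood_pressure", "heart_rate", "pulse"},
--             1: {"age", "gender", "weight", "height", "blood"},
--         },
--         "sales": {
--             3: {"product", "sales", "revenue", "quantity", "price", "order",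
--                 "customer", "invoice", "discount", "profit", "shipping"},
--             1: {"region", "total", "amount"},
--         },
--         "news": {
--             3: {"headline", "article", "publisher", "journalist", "edition"},
--             1: {"title", "author", "source", "published", "category", "date"},
--         },
--         "finance": {
--             3: {"stock", "ticker", "exchange", "portfolio", "dividend", "nasdaq",
--                 "market_cap", "closing_price", "opening_price"},
--             1: {"price", "volume", "market", "return"},
--         },
--         "hr": {
--             3: {"employee", "salary", "hire_date", "performance_review", "manager"},
--             1: {"department", "position", "performance", "attendance"},
--         },
--         "ecommerce": {
--             3: {"cart", "checkout", "sku", "wishlist", "coupon"},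
--             1: {"order", "shipping", "product", "quantity"},
--         },
--         "iot": {
--             3: {"sensor", "device_id", "reading", "humidity", "pressure"},
--             1: {"temperature", "timestamp", "device"},
--         },
--     }
--
--     # Score each type
--     scores: Dict[str, int] = {}
--     for dtype, keyword_weights in type_keywords.items():
--         score = 0
--         for weight, keywords in keyword_weights.items():
--             score += weight * len(col_names_lower & keywords)
--         if score > 0:
--             scores[dtype] = score
--
--     # Return the highest-scoring type
--     if scores:
--         return max(scores, key=scores.get)
--
--     return "generic"
-- ===== SOURCE B (Python) =====
-- def _detect_dataset_type(columns_info):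
--     """Detect dataset type via an inverted keyword index and one pass over the column names."""
--     tables = [
--         ("education", [
--             (3, ["student", "grade", "midterm", "final_exam", "attendance",
--                  "assignment", "exam", "gpa", "school", "university", "college",
--                  "teacher", "lecture", "course", "semester", "homework", "class",
--                  "study_hours", "participation_score", "overall_score", "sleep_hours",
--                  "extra_classes", "parent_education", "internet_access"]),
--             (1, ["score", "pass", "fail"]),
--         ]),
--         ("medical", [
--             (3, ["patient", "diagnosis", "treatment", "medication", "symptom",
--                  "doctor", "physician", "hospital", "disease", "clinical", "dosage",
--                  "prescription", "lab_result", "blood_pressure", "heart_rate", "pulse"]),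
--             (1, ["age", "gender", "weight", "height", "blood"]),
--         ]),
--         ("sales", [
--             (3, ["product", "sales", "revenue", "quantity", "price", "order",
--                  "customer", "invoice", "discount", "profit", "shipping"]),
--             (1, ["region", "total", "amount"]),
--         ]),
--         ("news", [
--             (3, ["headline", "article", "publisher", "journalist", "edition"]),
--             (1, ["title", "author", "source", "published", "category", "date"]),
--         ]),
--         ("finance", [
--             (3, ["stock", "ticker", "exchange", "portfolio", "dividend", "nasdaq",
--                  "market_cap", "closing_price", "opening_price"]),
--             (1, ["price", "volume", "market", "return"]),
--         ]),
--         ("hr", [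
--             (3, ["employee", "salary", "hire_date", "performance_review", "manager"]),
--             (1, ["department", "position", "performance", "attendance"]),
--         ]),
--         ("ecommerce", [
--             (3, ["cart", "checkout", "sku", "wishlist", "coupon"]),
--             (1, ["order", "shipping", "product", "quantity"]),
--         ]),
--         ("iot", [
--             (3, ["sensor", "device_id", "reading", "humidity", "pressure"]),
--             (1, ["temperature", "timestamp", "device"]),
--         ]),
--     ]
--
--     # Inverted index: keyword -> list of (dataset_type, weight)
--     index = {}
--     for dtype, weight_groups in tables:
--         for weight, keywords in weight_groups:
--             for kw in keywords:
--                 index.setdefault(kw, []).append((dtype, weight))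
--
--     scores = {dtype: 0 for dtype, _ in tables}
--     for name in {k.lower() for k in columns_info}:
--         for dtype, weight in index.get(name, []):
--             scores[dtype] += weight
--
--     best_type, best_score = "generic", 0
--     for dtype, _ in tables:
--         if scores[dtype] > best_score:
--             best_type, best_score = dtype, scores[dtype]
--     return best_type
-- ===== Notes on version B (the rewrite author's own statement) =====
-- stated objective: alternative
-- what changed: B replaces A's per-type set-intersection scoring by an inverted index (keyword -> [(type, weight)]) built once and consulted once per distinct lowered column name, and picks the argmax by a single strict-greater scan over the types in declaration order instead of max() over a filtered score dict.
import Mathlib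
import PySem

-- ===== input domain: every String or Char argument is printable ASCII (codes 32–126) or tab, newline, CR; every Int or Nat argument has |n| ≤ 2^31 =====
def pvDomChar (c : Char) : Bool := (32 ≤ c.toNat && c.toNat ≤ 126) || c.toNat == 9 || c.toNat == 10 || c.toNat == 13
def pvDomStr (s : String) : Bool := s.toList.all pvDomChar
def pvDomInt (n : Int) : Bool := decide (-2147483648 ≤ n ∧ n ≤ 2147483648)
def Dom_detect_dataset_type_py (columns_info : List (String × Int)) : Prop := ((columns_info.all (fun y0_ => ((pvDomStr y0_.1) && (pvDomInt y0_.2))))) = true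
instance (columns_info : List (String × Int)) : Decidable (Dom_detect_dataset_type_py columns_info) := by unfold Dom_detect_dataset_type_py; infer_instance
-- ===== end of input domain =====

-- B replaces A's per-type set intersections by an inverted keyword index consulted once per
-- distinct lowered column name, with the argmax taken in fixed type-declaration order
-- (objective: alternative — same result, different data structure and traversal).

-- shared keyword-table data (the same literals both Pythons carry)
def kwEdu3 : List String := ["student", "grade", "midterm", "final_exam", "attendance",
  "assignment", "exam", "gpa", "school", "university", "college",
  "teacher", "lecture", "course", "semester", "homework", "class",
  "study_hours", "participation_score", "overall_score", "sleep_hours",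
  "extra_classes", "parent_education", "internet_access"]
def kwEdu1 : List String := ["score", "pass", "fail"]
def kwMed3 : List String := ["patient", "diagnosis", "treatment", "medication", "symptom",
  "doctor", "physician", "hospital", "disease", "clinical", "dosage",
  "prescription", "lab_result", "blood_pressure", "heart_rate", "pulse"]
def kwMed1 : List String := ["age", "gender", "weight", "height", "blood"]
def kwSal3 : List String := ["product", "sales", "revenue", "quantity", "price", "order",
  "customer", "invoice", "discount", "profit", "shipping"]
def kwSal1 : List String := ["region", "total", "amount"]
def kwNews3 : List String := ["headline", "article", "publisher", "journalist", "edition"]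
def kwNews1 : List String := ["title", "author", "source", "published", "category", "date"]
def kwFin3 : List String := ["stock", "ticker", "exchange", "portfolio", "dividend", "nasdaq",
  "market_cap", "closing_price", "opening_price"]
def kwFin1 : List String := ["price", "volume", "market", "return"]
def kwHr3 : List String := ["employee", "salary", "hire_date", "performance_review", "manager"]
def kwHr1 : List String := ["department", "position", "performance", "attendance"]
def kwEco3 : List String := ["cart", "checkout", "sku", "wishlist", "coupon"]
def kwEco1 : List String := ["order", "shipping", "product", "quantity"]
def kwIot3 : List String := ["sensor", "device_id", "reading", "humidity", "pressure"]
def kwIot1 : List String := ["temperature", "timestamp", "device"]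

-- ===== PORT A =====
-- A's table: dtype -> [(weight, keyword set)] (Python dict / set literals)
def kwTablesA : List (String × List (Int × PySem.Set String)) :=
  [("education", [(3, PySem.Set.ofList kwEdu3), (1, PySem.Set.ofList kwEdu1)]),
   ("medical",   [(3, PySem.Set.ofList kwMed3), (1, PySem.Set.ofList kwMed1)]),
   ("sales",     [(3, PySem.Set.ofList kwSal3), (1, PySem.Set.ofList kwSal1)]),
   ("news",      [(3, PySem.Set.ofList kwNews3), (1, PySem.Set.ofList kwNews1)]),
   ("finance",   [(3, PySem.Set.ofList kwFin3), (1, PySem.Set.ofList kwFin1)]),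
   ("hr",        [(3, PySem.Set.ofList kwHr3), (1, PySem.Set.ofList kwHr1)]),
   ("ecommerce", [(3, PySem.Set.ofList kwEco3), (1, PySem.Set.ofList kwEco1)]),
   ("iot",       [(3, PySem.Set.ofList kwIot3), (1, PySem.Set.ofList kwIot1)])]

def detect_dataset_type_py (columns_info : List (String × Int)) : String :=
  let colNames : PySem.Set String :=
    PySem.Set.ofList (columns_info.map (fun p => PySem.Str.lower p.1))
  let scores : PySem.Dict String Int :=
    kwTablesA.foldl (fun sc tw =>
      let score := tw.2.foldl (fun s wk => s + wk.1 * ((PySem.Set.inter colNames wk.2).length : Int)) 0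
      if 0 < score then sc.insert tw.1 score else sc) PySem.Dict.empty
  if scores.items ≠ [] then
    match PySem.List.max? scores.keys (fun k => scores.getD k 0) with
    | some k => k
    | none => "generic"
  else "generic"

-- ===== PORT B =====
-- B's table: dtype -> [(weight, keyword list)] (Python list/tuple literals)
def tablesB : List (String × List (Int × List String)) :=
  [("education", [(3, kwEdu3), (1, kwEdu1)]),
   ("medical",   [(3, kwMed3), (1, kwMed1)]),
   ("sales",     [(3, kwSal3), (1, kwSal1)]),
   ("news",      [(3, kwNews3), (1, kwNews1)]),
   ("finance",   [(3, kwFin3), (1, kwFin1)]),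
   ("hr",        [(3, kwHr3), (1, kwHr1)]),
   ("ecommerce", [(3, kwEco3), (1, kwEco1)]),
   ("iot",       [(3, kwIot3), (1, kwIot1)])]

-- inverted index: keyword -> [(dtype, weight)]  (B builds it by the triple loop; setdefault+append = modify)
def pvIndex : PySem.Dict String (List (String × Int)) :=
  tablesB.foldl (fun ix tg =>
    tg.2.foldl (fun ix wg =>
      wg.2.foldl (fun ix kw => ix.modify kw [] (fun l => l ++ [(tg.1, wg.1)])) ix) ix)
    PySem.Dict.empty

-- scores = {dtype: 0 for dtype, _ in tables}
def pvScores0 : PySem.Dict String Int :=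
  tablesB.foldl (fun sc tg => sc.insert tg.1 0) PySem.Dict.empty

def detect_dataset_type_py_alt (columns_info : List (String × Int)) : String :=
  let names : PySem.Set String :=
    PySem.Set.ofList (columns_info.map (fun p => PySem.Str.lower p.1))
  let scores : PySem.Dict String Int :=
    names.foldl (fun sc n =>
      (pvIndex.getD n []).foldl (fun sc tw => sc.modify tw.1 0 (fun v => v + tw.2)) sc) pvScores0
  (tablesB.foldl (fun b tg =>
      if b.2 < scores.getD tg.1 0 then (tg.1, scores.getD tg.1 0) else b) ("generic", (0:Int))).1

-- ===== PRECONDITION & SPEC =====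
def Spec_detect_dataset_type_py (columns_info : List (String × Int)) (out : String) : Prop := out = detect_dataset_type_py_alt columns_info
instance (columns_info : List (String × Int)) (out : String) : Decidable (Spec_detect_dataset_type_py columns_info out) := by unfold Spec_detect_dataset_type_py; infer_instance

-- ===== CLAIM (what is proved, stated in full; the proofs are below) =====
def Claim_equal_detect_dataset_type_py : Prop := ∀ (columns_info : List (String × Int)), Dom_detect_dataset_type_py columns_info → Spec_detect_dataset_type_py columns_info (detect_dataset_type_py columns_info)

-- ===== LEMMAS AND PROOFS =====

-- weight contributed to type t by an entry list of the inverted index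
def pvSumT (t : String) (es : List (String × Int)) : Int :=
  ((es.filter (fun tw => tw.1 == t)).map (·.2)).sum

-- total weight a single lowered name contributes to type t
def pvContrib (n t : String) : Int := pvSumT t (pvIndex.getD n [])

-- the per-type score as A computes it (0 + 3·|S∩K3| + 1·|S∩K1|)
def tyScore (S : List String) (K3 K1 : PySem.Set String) : Int :=
  0 + 3 * ((PySem.Set.inter S K3).length : Int) + 1 * ((PySem.Set.inter S K1).length : Int)

-- the (type, score) list both ports' decision step reduces to
def pairsL (S : List String) : List (String × Int) :=
  [("education", tyScore S (PySem.Set.ofList kwEdu3) (PySem.Set.ofList kwEdu1)),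
   ("medical",   tyScore S (PySem.Set.ofList kwMed3) (PySem.Set.ofList kwMed1)),
   ("sales",     tyScore S (PySem.Set.ofList kwSal3) (PySem.Set.ofList kwSal1)),
   ("news",      tyScore S (PySem.Set.ofList kwNews3) (PySem.Set.ofList kwNews1)),
   ("finance",   tyScore S (PySem.Set.ofList kwFin3) (PySem.Set.ofList kwFin1)),
   ("hr",        tyScore S (PySem.Set.ofList kwHr3) (PySem.Set.ofList kwHr1)),
   ("ecommerce", tyScore S (PySem.Set.ofList kwEco3) (PySem.Set.ofList kwEco1)),
   ("iot",       tyScore S (PySem.Set.ofList kwIot3) (PySem.Set.ofList kwIot1))]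

-- B's inner loop adds to t exactly the matching weights of the entry list
theorem modify_sum (es : List (String × Int)) (sc : PySem.Dict String Int) (t : String) :
    (es.foldl (fun sc tw => sc.modify tw.1 0 (fun v => v + tw.2)) sc).getD t 0
      = sc.getD t 0 + pvSumT t es := by
  induction es generalizing sc with
  | nil => simp [pvSumT]
  | cons tw es ih =>
    simp only [List.foldl_cons, ih, pvSumT, List.filter_cons]
    by_cases h : tw.1 = t
    · simp [h]
      ring
    · have hb : (tw.1 == t) = false := by simp [h]
      have h' : ¬ t = tw.1 := fun he => h he.symm
      simp [hb, PySem.Dict.getD_modify, h']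

-- B's outer loop over the names accumulates the per-name contributions
theorem scores_getD (S : List String) (sc : PySem.Dict String Int) (t : String) :
    (S.foldl (fun sc n =>
        (pvIndex.getD n []).foldl (fun sc tw => sc.modify tw.1 0 (fun v => v + tw.2)) sc) sc).getD t 0
      = sc.getD t 0 + (S.map (fun n => pvContrib n t)).sum := by
  induction S generalizing sc with
  | nil => simp
  | cons n S ih =>
    simp only [List.foldl_cons, ih, modify_sum, pvContrib, List.map_cons, List.sum_cons]
    ring

-- lookup in a concretely-checked dict, characterised for every string
theorem dictScan (t : String) (K3 K1 : List String)
    (hnd : pvIndex.keys.Nodup)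
    (hitems : ∀ p ∈ pvIndex.items,
      pvSumT t p.2 = 3 * (if p.1 ∈ K3 then (1:Int) else 0) + (if p.1 ∈ K1 then (1:Int) else 0))
    (h3 : ∀ k ∈ K3, k ∈ pvIndex.keys) (h1 : ∀ k ∈ K1, k ∈ pvIndex.keys) :
    ∀ n, pvContrib n t = 3 * (if n ∈ K3 then (1:Int) else 0) + (if n ∈ K1 then (1:Int) else 0) := by
  intro n
  unfold pvContrib
  by_cases hc : pvIndex.contains n = true
  · have hk : n ∈ pvIndex.keys := (PySem.Dict.contains_iff_mem_keys _ _).1 hc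
    obtain ⟨p, hp, hpe⟩ := List.mem_map.1 hk
    have : pvIndex.getD n [] = p.2 := by
      subst hpe; exact PySem.Dict.getD_of_mem_items _ (by simpa using hp) hnd _
    rw [this]
    have := hitems p hp
    rwa [hpe] at this
  · have hcf : pvIndex.contains n = false := by simpa using hc
    rw [PySem.Dict.getD_of_not_contains _ _ hcf]
    have hn3 : n ∉ K3 := fun h => hc ((PySem.Dict.contains_iff_mem_keys _ _).2 (h3 n h))
    have hn1 : n ∉ K1 := fun h => hc ((PySem.Dict.contains_iff_mem_keys _ _).2 (h1 n h))
    simp [pvSumT, hn3, hn1]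

set_option maxRecDepth 40000 in
theorem contrib_edu : ∀ n, pvContrib n "education" = 3 * (if n ∈ kwEdu3 then (1:Int) else 0) + (if n ∈ kwEdu1 then (1:Int) else 0) :=
  dictScan _ _ _ (by decide) (by decide) (by decide) (by decide)
set_option maxRecDepth 40000 in
theorem contrib_med : ∀ n, pvContrib n "medical" = 3 * (if n ∈ kwMed3 then (1:Int) else 0) + (if n ∈ kwMed1 then (1:Int) else 0) :=
  dictScan _ _ _ (by decide) (by decide) (by decide) (by decide)
set_option maxRecDepth 40000 in
theorem contrib_sal : ∀ n, pvContrib n "sales" = 3 * (if n ∈ kwSal3 then (1:Int) else 0) + (if n ∈ kwSal1 then (1:Int) else 0) :=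
  dictScan _ _ _ (by decide) (by decide) (by decide) (by decide)
set_option maxRecDepth 40000 in
theorem contrib_news : ∀ n, pvContrib n "news" = 3 * (if n ∈ kwNews3 then (1:Int) else 0) + (if n ∈ kwNews1 then (1:Int) else 0) :=
  dictScan _ _ _ (by decide) (by decide) (by decide) (by decide)
set_option maxRecDepth 40000 in
theorem contrib_fin : ∀ n, pvContrib n "finance" = 3 * (if n ∈ kwFin3 then (1:Int) else 0) + (if n ∈ kwFin1 then (1:Int) else 0) :=
  dictScan _ _ _ (by decide) (by decide) (by decide) (by decide)
set_option maxRecDepth 40000 in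
theorem contrib_hr : ∀ n, pvContrib n "hr" = 3 * (if n ∈ kwHr3 then (1:Int) else 0) + (if n ∈ kwHr1 then (1:Int) else 0) :=
  dictScan _ _ _ (by decide) (by decide) (by decide) (by decide)
set_option maxRecDepth 40000 in
theorem contrib_eco : ∀ n, pvContrib n "ecommerce" = 3 * (if n ∈ kwEco3 then (1:Int) else 0) + (if n ∈ kwEco1 then (1:Int) else 0) :=
  dictScan _ _ _ (by decide) (by decide) (by decide) (by decide)
set_option maxRecDepth 40000 in
theorem contrib_iot : ∀ n, pvContrib n "iot" = 3 * (if n ∈ kwIot3 then (1:Int) else 0) + (if n ∈ kwIot1 then (1:Int) else 0) :=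
  dictScan _ _ _ (by decide) (by decide) (by decide) (by decide)

-- |S ∩ set(K)| is a countP over S
theorem interLen (S : List String) (K : List String) :
    ((PySem.Set.inter S (PySem.Set.ofList K)).length : Int)
      = (S.countP (fun n => decide (n ∈ K)) : Int) := by
  unfold PySem.Set.inter
  rw [← List.countP_eq_length_filter]
  congr 1
  apply List.countP_congr
  intro a _
  simp [PySem.Set.contains, PySem.Set.mem_ofList]

-- summing the contributions of all names gives A's weighted intersection count
theorem sum_contrib (S : List String) (t : String) (K3 K1 : List String)
    (h : ∀ n, pvContrib n t = 3 * (if n ∈ K3 then (1:Int) else 0) + (if n ∈ K1 then (1:Int) else 0)) :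
    (S.map (fun n => pvContrib n t)).sum
      = tyScore S (PySem.Set.ofList K3) (PySem.Set.ofList K1) := by
  unfold tyScore
  rw [interLen, interLen]
  induction S with
  | nil => simp
  | cons n S ih =>
    simp only [List.map_cons, List.sum_cons, ih, h n, List.countP_cons]
    by_cases h3 : n ∈ K3 <;> by_cases h1 : n ∈ K1 <;>
      simp [h3, h1] <;> ring

-- per-type score equality: B's accumulated dict agrees with A's per-type score
theorem scoreB_eq (S : List String) (t : String) (K3 K1 : List String)
    (ht : pvScores0.getD t 0 = 0)
    (h : ∀ n, pvContrib n t = 3 * (if n ∈ K3 then (1:Int) else 0) + (if n ∈ K1 then (1:Int) else 0)) :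
    (S.foldl (fun sc n =>
        (pvIndex.getD n []).foldl (fun sc tw => sc.modify tw.1 0 (fun v => v + tw.2)) sc) pvScores0).getD t 0
      = tyScore S (PySem.Set.ofList K3) (PySem.Set.ofList K1) := by
  rw [scores_getD, ht, sum_contrib S t K3 K1 h, zero_add]

-- A's conditional-insert loop over fresh distinct keys builds exactly the positive entries
theorem items_condinsert (L : List (String × Int)) (d : PySem.Dict String Int)
    (hf : ∀ p ∈ L, d.contains p.1 = false) (hnd : (L.map Prod.fst).Nodup) :
    (L.foldl (fun d p => if 0 < p.2 then d.insert p.1 p.2 else d) d).items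
      = d.items ++ L.filter (fun p => decide (0 < p.2)) := by
  induction L generalizing d with
  | nil => simp
  | cons p L ih =>
    simp only [List.map_cons, List.nodup_cons] at hnd
    have hfp : d.contains p.1 = false := hf p (by simp)
    simp only [List.foldl_cons, List.filter_cons]
    by_cases hp : 0 < p.2
    · have hfr : ∀ q ∈ L, (d.insert p.1 p.2).contains q.1 = false := by
        intro q hq
        rw [PySem.Dict.contains_insert]
        have : q.1 ≠ p.1 := fun he => hnd.1 (he ▸ List.mem_map_of_mem hq)
        simp [this, hf q (by simp [hq])]
      rw [if_pos hp, ih _ hfr hnd.2,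
        PySem.Dict.items_insert_of_not_contains _ _ hfp]
      simp [hp]
    · rw [if_neg hp, ih _ (fun q hq => hf q (by simp [hq])) hnd.2]
      simp [hp]

-- the Option-accumulator form of max? with a some start is the plain running first-argmax
theorem optfold (F : List (String × Int)) :
    ∀ m : String × Int,
    F.foldl (fun acc p => match acc with
      | none => some p
      | some m => if m.2 < p.2 then some p else some m) (some m)
      = some (F.foldl (fun b p => if b.2 < p.2 then p else b) m) := by
  induction F with
  | nil => intro m; rfl
  | cons p F ih =>
    intro m
    simp only [List.foldl_cons]
    by_cases h : m.2 < p.2 <;> simp [h, ih]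

-- entries not above a threshold ≤ the accumulator's value never move the running argmax
theorem filt (L : List (String × Int)) :
    ∀ (m : String × Int) (c : Int), c ≤ m.2 →
    L.foldl (fun b p => if b.2 < p.2 then p else b) m
      = (L.filter (fun p => decide (c < p.2))).foldl (fun b p => if b.2 < p.2 then p else b) m := by
  induction L with
  | nil => intros; rfl
  | cons p L ih =>
    intro m c hc
    simp only [List.foldl_cons, List.filter_cons]
    by_cases h : c < p.2
    · simp only [h, decide_true, if_true, List.foldl_cons]
      by_cases h2 : m.2 < p.2
      · rw [if_pos h2]; exact ih p c (le_of_lt h)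
      · rw [if_neg h2]; exact ih m c hc
    · have h2 : ¬ m.2 < p.2 := fun hl => h (lt_of_le_of_lt hc hl)
      simp only [h, decide_false, Bool.false_eq_true, if_false, if_neg h2]
      exact ih m c hc

-- max? over the projected keys is the projection of max? over the pairs
theorem mapmax (keyfn : String → Int) (F : List (String × Int)) :
    ∀ (q : Option (String × Int)),
    (∀ p ∈ F, keyfn p.1 = p.2) → (∀ p ∈ q, keyfn p.1 = p.2) →
    (F.map Prod.fst).foldl (fun acc k => match acc with
        | none => some k
        | some m => if keyfn m < keyfn k then some k else some m) (Option.map Prod.fst q)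
      = Option.map Prod.fst (F.foldl (fun acc p => match acc with
        | none => some p
        | some m => if m.2 < p.2 then some p else some m) q) := by
  induction F with
  | nil => intro q _ _; rfl
  | cons p F ih =>
    intro q hF hq
    simp only [List.map_cons, List.foldl_cons]
    have hp : keyfn p.1 = p.2 := hF p (by simp)
    have hstep : (match Option.map Prod.fst q with
        | none => some p.1
        | some m => if keyfn m < keyfn p.1 then some p.1 else some m)
        = Option.map Prod.fst (match q with
        | none => some p
        | some m => if m.2 < p.2 then some p else some m) := by
      cases q with
      | none => rfl
      | some m =>
        have hm : keyfn m.1 = m.2 := hq m rfl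
        simp only [Option.map_some, hm, hp]
        by_cases h : m.2 < p.2 <;> simp [h]
    rw [hstep]
    apply ih
    · intro r hr; exact hF r (by simp [hr])
    · intro r hr
      cases q with
      | none => simp at hr; subst hr; exact hp
      | some m =>
        by_cases h : m.2 < p.2 <;> simp [h] at hr <;> subst hr
        · exact hp
        · exact hq m rfl

theorem mapmax_none (keyfn : String → Int) (F : List (String × Int))
    (hF : ∀ p ∈ F, keyfn p.1 = p.2) :
    (F.map Prod.fst).foldl (fun acc k => match acc with
        | none => some k
        | some m => if keyfn m < keyfn k then some k else some m) none
      = Option.map Prod.fst (F.foldl (fun acc p => match acc with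
        | none => some p
        | some m => if m.2 < p.2 then some p else some m) none) :=
  mapmax keyfn F none hF (by intro r hr; simp at hr)

-- the decision step: A's "max over the positive-score dict" = B's strict running argmax
theorem final_step (L : List (String × Int)) (hnd : (L.map Prod.fst).Nodup) :
    (let d := L.foldl (fun d p => if 0 < p.2 then d.insert p.1 p.2 else d) PySem.Dict.empty
     if d.items ≠ [] then
       match PySem.List.max? d.keys (fun k => d.getD k 0) with
       | some k => k
       | none => "generic"
     else "generic")
      = (L.foldl (fun b p => if b.2 < p.2 then p else b) ("generic", (0:Int))).1 := by
  simp only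
  set d := L.foldl (fun d p => if 0 < p.2 then d.insert p.1 p.2 else d) PySem.Dict.empty with hd
  have hitems : d.items = L.filter (fun p => decide (0 < p.2)) := by
    rw [hd, items_condinsert L PySem.Dict.empty (fun p _ => PySem.Dict.contains_empty _) hnd]
    rfl
  have hkeys : d.keys = (L.filter (fun p => decide (0 < p.2))).map Prod.fst := by
    simp only [PySem.Dict.keys, hitems]
  have hndF : ((L.filter (fun p => decide (0 < p.2))).map Prod.fst).Nodup :=
    hnd.sublist (List.Sublist.map Prod.fst List.filter_sublist)
  have hgetD : ∀ p ∈ L.filter (fun p => decide (0 < p.2)), d.getD p.1 0 = p.2 := by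
    intro p hp
    have hmem : (p.1, p.2) ∈ d.items := by rw [hitems]; simpa using hp
    exact PySem.Dict.getD_of_mem_items _ hmem (by rw [hkeys]; exact hndF) _
  have hfilt := filt L ("generic", (0:Int)) 0 (le_refl 0)
  cases hFc : L.filter (fun p => decide (0 < p.2)) with
  | nil =>
    rw [hFc] at hitems hfilt
    rw [hitems]
    simp only [ne_eq, not_true_eq_false, if_false]
    rw [hfilt]
    rfl
  | cons p F' =>
    rw [hFc] at hitems hkeys hfilt hgetD
    have hne : d.items ≠ [] := by rw [hitems]; simp
    rw [if_pos hne, hkeys]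
    have hbridge : PySem.List.max? ((p :: F').map Prod.fst) (fun k => d.getD k 0)
        = ((p :: F').map Prod.fst).foldl (fun acc k => match acc with
            | none => some k
            | some m => if d.getD m 0 < d.getD k 0 then some k else some m) none := by
      unfold PySem.List.max?
      apply List.foldl_ext
      intro acc x _
      cases acc <;> rfl
    rw [hbridge, mapmax_none (fun k => d.getD k 0) (p :: F') hgetD]
    simp only [List.foldl_cons]
    rw [optfold]
    rw [hfilt]
    simp only [List.foldl_cons]
    have hp2 : (0:Int) < p.2 := by
      have hpm : p ∈ L.filter (fun p => decide (0 < p.2)) := by rw [hFc]; simp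
      simpa using (List.of_mem_filter hpm)
    rw [if_pos (by simpa using hp2)]
    rfl

-- A's scoring loop over the concrete table produces the literal pair list
theorem A_eq (S : List String) :
    (kwTablesA.foldl (fun sc tw =>
      let score := tw.2.foldl (fun s wk => s + wk.1 * ((PySem.Set.inter S wk.2).length : Int)) 0
      if 0 < score then sc.insert tw.1 score else sc) PySem.Dict.empty)
      = (pairsL S).foldl (fun d p => if 0 < p.2 then d.insert p.1 p.2 else d) PySem.Dict.empty := by
  simp only [kwTablesA, pairsL, tyScore, List.foldl]

theorem pairsL_nodup (S : List String) : ((pairsL S).map Prod.fst).Nodup := by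
  simp only [pairsL, List.map]
  decide

-- ===== VERDICT (by name: the statement is the Claim_ definition above) =====
theorem detect_dataset_type_py_spec : Claim_equal_detect_dataset_type_py := by
  intro columns_info _
  unfold Spec_detect_dataset_type_py detect_dataset_type_py detect_dataset_type_py_alt
  simp only
  set S : List String := PySem.Set.ofList (columns_info.map (fun p => PySem.Str.lower p.1)) with hS
  rw [A_eq S]
  rw [final_step (pairsL S) (pairsL_nodup S)]
  set sc := S.foldl (fun sc n =>
      (pvIndex.getD n []).foldl (fun sc tw => sc.modify tw.1 0 (fun v => v + tw.2)) sc) pvScores0 with hsc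
  have h1 := scoreB_eq S "education" kwEdu3 kwEdu1 (by decide) contrib_edu
  have h2 := scoreB_eq S "medical" kwMed3 kwMed1 (by decide) contrib_med
  have h3 := scoreB_eq S "sales" kwSal3 kwSal1 (by decide) contrib_sal
  have h4 := scoreB_eq S "news" kwNews3 kwNews1 (by decide) contrib_news
  have h5 := scoreB_eq S "finance" kwFin3 kwFin1 (by decide) contrib_fin
  have h6 := scoreB_eq S "hr" kwHr3 kwHr1 (by decide) contrib_hr
  have h7 := scoreB_eq S "ecommerce" kwEco3 kwEco1 (by decide) contrib_eco
  have h8 := scoreB_eq S "iot" kwIot3 kwIot1 (by decide) contrib_iot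
  rw [← hsc] at h1 h2 h3 h4 h5 h6 h7 h8
  simp only [pairsL, tablesB, List.foldl, h1, h2, h3, h4, h5, h6, h7, h8]
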